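-- pv_equiv track=rewrite | github.com/HenriqueAccorinti/Programming-Basics | 2° Bimestre/Exercícios/A13/T3_CalcularPontuação(senha).py | CalcularPontuacao
-- ===== SOURCE A (Python) =====
-- def CalcularPontuacao(senha):
--     p = 0
--     jafoi = ""
--     for letra in senha.lower():
--         if letra in "abcdefghijklmnopqrstuvwxyz":
--             p += 1
--         elif letra in "0123456789":
--             p += 3
--         else:
--             p += 4
--         if letra in jafoi:
--             p -= 3
--         jafoi += letra
--     return p
-- ===== SOURCE B (Python) =====
-- def CalcularPontuacao(senha):
--     s = senha.lower()
--     base = sum(1 if c in "abcdefghijklmnopqrstuvwxyz"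
--                else 3 if c in "0123456789"
--                else 4
--                for c in s)
--     return base - 3 * (len(s) - len(set(s)))
-- ===== Notes on version B (the rewrite author's own statement) =====
-- stated objective: faster
-- what changed: Replaces A's incrementally grown seen-string and its per-character repeat-membership scan by a single classification sum plus a closed-form repeat penalty 3*(len(s) - len(set(s))) from one hash-set build.
import Mathlib
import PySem

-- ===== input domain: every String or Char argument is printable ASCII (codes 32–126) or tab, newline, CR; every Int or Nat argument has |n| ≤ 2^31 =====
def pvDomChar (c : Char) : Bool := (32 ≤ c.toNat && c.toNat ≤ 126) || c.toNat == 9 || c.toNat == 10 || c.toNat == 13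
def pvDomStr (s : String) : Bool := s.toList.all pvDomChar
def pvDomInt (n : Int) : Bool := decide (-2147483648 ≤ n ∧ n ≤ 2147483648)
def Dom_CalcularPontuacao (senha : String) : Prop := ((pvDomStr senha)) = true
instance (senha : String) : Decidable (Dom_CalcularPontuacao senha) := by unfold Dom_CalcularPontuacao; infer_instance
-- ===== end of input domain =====

-- B replaces A's incrementally grown seen-string and per-char repeat branch by one
-- classification sum plus a closed-form penalty 3*(len - #distinct); objective: simpler.

-- ===== PORT A =====
-- the for-loop of A: state (p, seen-string), processing the lowered characters in order
def pvALoop (p : Int) (jafoi : List Char) : List Char → Int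
  | [] => p
  | letra :: rest =>
      let p1 := p + (if ("abcdefghijklmnopqrstuvwxyz".toList).contains letra then (1 : Int)
                     else if ("0123456789".toList).contains letra then 3 else 4)
      let p2 := if jafoi.contains letra then p1 - 3 else p1
      pvALoop p2 (jafoi ++ [letra]) rest

def CalcularPontuacao (senha : String) : Int :=
  pvALoop 0 [] (PySem.Str.lower senha).toList

-- ===== PORT B =====
-- classification of one character of the lowered password
def pvCls (c : Char) : Int :=
  if ("abcdefghijklmnopqrstuvwxyz".toList).contains c then 1
  else if ("0123456789".toList).contains c then 3 else 4

def CalcularPontuacao_alt (senha : String) : Int :=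
  ((PySem.Str.lower senha).toList.map pvCls).sum
    - 3 * (((PySem.Str.lower senha).toList.length : Int)
            - ((PySem.Set.ofList (PySem.Str.lower senha).toList).length : Int))

-- ===== PRECONDITION & SPEC =====
def Spec_CalcularPontuacao (senha : String) (out : Int) : Prop := out = CalcularPontuacao_alt senha
instance (senha : String) (out : Int) : Decidable (Spec_CalcularPontuacao senha out) := by unfold Spec_CalcularPontuacao; infer_instance

-- ===== CLAIM (what is proved, stated in full; the proofs are below) =====
def Claim_equal_CalcularPontuacao : Prop := ∀ (senha : String), Dom_CalcularPontuacao senha → Spec_CalcularPontuacao senha (CalcularPontuacao senha)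

-- ===== LEMMAS AND PROOFS =====

-- number of elements of l that are NEW relative to the seen-list j (each first occurrence counted once)
def pvDCount (j : List Char) : List Char → Int
  | [] => 0
  | c :: t => if j.contains c then pvDCount j t else 1 + pvDCount (j ++ [c]) t

theorem pvDCount_congr (l : List Char) : ∀ (j j' : List Char),
    (∀ c, c ∈ j ↔ c ∈ j') → pvDCount j l = pvDCount j' l := by
  induction l with
  | nil => intro j j' _; rfl
  | cons c t ih =>
      intro j j' h
      have hc : j.contains c = j'.contains c := by simp [h c]
      simp only [pvDCount, hc]
      split
      · exact ih j j' h
      · rw [ih (j ++ [c]) (j' ++ [c]) (by intro d; simp [List.mem_append, h d])]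

theorem pvALoop_eq (l : List Char) : ∀ (p : Int) (j : List Char),
    pvALoop p j l = p + (l.map pvCls).sum - 3 * ((l.length : Int) - pvDCount j l) := by
  induction l with
  | nil => intro p j; simp [pvALoop, pvDCount]
  | cons c t ih =>
      intro p j
      simp only [pvALoop, pvDCount, List.map, List.sum_cons, List.length_cons]
      by_cases hc : j.contains c
      · simp only [hc, if_true]
        rw [ih]
        have hcm : c ∈ j := by simpa using hc
        have hcong : pvDCount (j ++ [c]) t = pvDCount j t := by
          apply pvDCount_congr
          intro d
          simp only [List.mem_append, List.mem_singleton]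
          constructor
          · rintro (hd | rfl)
            · exact hd
            · exact hcm
          · exact Or.inl
        rw [hcong]
        unfold pvCls
        push_cast
        ring
      · simp only [hc]
        rw [ih]
        unfold pvCls
        push_cast
        ring

theorem pvSetLen_eq (l : List Char) : ∀ (j : List Char),
    ((l.foldl PySem.Set.add j).length : Int) = (j.length : Int) + pvDCount j l := by
  induction l with
  | nil => intro j; simp [pvDCount]
  | cons c t ih =>
      intro j
      simp only [List.foldl_cons, pvDCount, PySem.Set.add, PySem.Set.contains]
      by_cases hc : j.contains c
      · simp only [hc, if_true]; exact ih j
      · simp only [hc, Bool.false_eq_true, if_false]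
        rw [ih (j ++ [c])]
        simp [List.length_append]
        ring

-- ===== VERDICT (by name: the statement is the Claim_ definition above) =====
theorem CalcularPontuacao_spec : Claim_equal_CalcularPontuacao := by
  intro senha _
  unfold Spec_CalcularPontuacao CalcularPontuacao CalcularPontuacao_alt
  rw [pvALoop_eq]
  rw [show PySem.Set.ofList (PySem.Str.lower senha).toList
        = (PySem.Str.lower senha).toList.foldl PySem.Set.add [] from PySem.Set.ofList_eq_foldl _]
  rw [pvSetLen_eq]
  simp
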